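-- pv_equiv track=rewrite | github.com/karthik-siru/practice-simple | array/equipairs.py | solve
-- ===== SOURCE A (Python) =====
-- def solve(nums):
--
--     if len(nums) < 2 :
--         return 0
--
--     hash = {}
--
--     for i in nums :
--         hash[i] = hash.get(i, 0) + 1
--     count = 0
--     for i, j in hash.items():
--         count += j*(j-1)//2
--
--     return count
-- ===== SOURCE B (Python) =====
-- def solve(nums):
--     # One pass: each new occurrence of x pairs with every earlier occurrence.
--     seen = {}
--     count = 0
--     for x in nums:
--         c = seen.get(x, 0)
--         count += c
--         seen[x] = c + 1
--     return count
-- ===== Notes on version B (the rewrite author's own statement) =====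
-- stated objective: simpler
-- what changed: Replaced the two-phase count (build a frequency dict, then loop over items summing j*(j-1)//2) by a single pass that adds, for each element, the number of earlier equal elements; no second loop, no division, no length guard.
import Mathlib
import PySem

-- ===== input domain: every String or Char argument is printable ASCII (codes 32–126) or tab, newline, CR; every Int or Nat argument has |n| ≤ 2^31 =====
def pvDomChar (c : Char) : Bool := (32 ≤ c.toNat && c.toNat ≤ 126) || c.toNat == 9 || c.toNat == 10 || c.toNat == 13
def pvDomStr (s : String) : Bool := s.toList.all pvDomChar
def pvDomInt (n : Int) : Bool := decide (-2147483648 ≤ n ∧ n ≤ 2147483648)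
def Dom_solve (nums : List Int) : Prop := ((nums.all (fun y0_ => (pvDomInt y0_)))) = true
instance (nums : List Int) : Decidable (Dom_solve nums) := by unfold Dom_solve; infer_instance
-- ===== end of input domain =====

-- B replaces A's two-phase count (frequency dict, then sum of j*(j-1)//2 over items)
-- by a single pass adding, for each element, the number of earlier equal elements (simpler, no division).


-- ===== PORT A =====
def solve (nums : List Int) : Int :=
  if nums.length < 2 then 0
  else
    let hash := nums.foldl (fun d i => d.insert i (d.getD i 0 + 1)) (PySem.Dict.empty : PySem.Dict Int Int)
    hash.items.foldl (fun count p => count + PySem.Int.floordiv (p.2 * (p.2 - 1)) 2) 0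

-- ===== PORT B =====
def solve_alt (nums : List Int) : Int :=
  (nums.foldl
    (fun (s : PySem.Dict Int Int × Int) x =>
      let c := s.1.getD x 0
      (s.1.insert x (c + 1), s.2 + c))
    ((PySem.Dict.empty : PySem.Dict Int Int), 0)).2

-- ===== PRECONDITION & SPEC =====
def Spec_solve (nums : List Int) (out : Int) : Prop := out = solve_alt nums
instance (nums : List Int) (out : Int) : Decidable (Spec_solve nums out) := by unfold Spec_solve; infer_instance

-- ===== CLAIM (what is proved, stated in full; the proofs are below) =====
def Claim_equal_solve : Prop := ∀ (nums : List Int), Dom_solve nums → Spec_solve nums (solve nums)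

-- ===== LEMMAS AND PROOFS =====

-- C(c,2) as A computes it
def pvPairs (c : Int) : Int := PySem.Int.floordiv (c * (c - 1)) 2

-- A's second loop as a sum over the distinct values
def pvTotal (l : List Int) : Int :=
  ((PySem.Set.ofList l).map (fun k => pvPairs ((l.count k : Int)))).sum

theorem pvPairs_succ (c : Int) : pvPairs (c + 1) = pvPairs c + c := by
  unfold pvPairs
  rw [PySem.Int.floordiv_eq_ediv_of_pos (by norm_num), PySem.Int.floordiv_eq_ediv_of_pos (by norm_num)]
  have h : (c + 1) * (c + 1 - 1) = c * (c - 1) + c * 2 := by ring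
  rw [h, Int.add_mul_ediv_right _ _ (by norm_num)]

-- perturbing one term of a sum over a Nodup list
theorem pvSum_perturb (L : List Int) (g g' : Int → Int) (x : Int) (hnd : L.Nodup) (hx : x ∈ L)
    (h : ∀ k ∈ L, k ≠ x → g' k = g k) :
    (L.map g').sum = (L.map g).sum + (g' x - g x) := by
  induction L with
  | nil => cases hx
  | cons a t ih =>
    rcases List.mem_cons.mp hx with rfl | hxt
    · have ht : ∀ k ∈ t, g' k = g k := fun k hk =>
        h k (List.mem_cons_of_mem _ hk) (fun he => (List.nodup_cons.mp hnd).1 (he ▸ hk))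
      simp [List.map_congr_left ht]; ring
    · have ha : g' a = g a := h a (List.mem_cons_self) (fun he => (List.nodup_cons.mp hnd).1 (he ▸ hxt))
      have := ih (List.nodup_cons.mp hnd).2 hxt (fun k hk => h k (List.mem_cons_of_mem _ hk))
      simp [ha, this]; ring

theorem pvTotal_step (l : List Int) (x : Int) :
    pvTotal (l ++ [x]) = pvTotal l + (l.count x : Int) := by
  unfold pvTotal
  rw [PySem.Set.ofList_append_singleton, PySem.Set.add_eq_ite]
  by_cases hx : x ∈ PySem.Set.ofList l
  · rw [if_pos hx]
    have hxl : x ∈ l := (PySem.Set.mem_ofList l x).mp hx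
    have := pvSum_perturb (PySem.Set.ofList l)
      (fun k => pvPairs ((l.count k : Int)))
      (fun k => pvPairs (((l ++ [x]).count k : Int))) x (PySem.Set.nodup_ofList l) hx
      (by
        intro k hk hkx
        simp [List.count_append, Ne.symm hkx])
    rw [this]
    beta_reduce
    have hc : ((l ++ [x]).count x : Int) = (l.count x : Int) + 1 := by
      simp [List.count_append]
    rw [hc, pvPairs_succ]; ring
  · rw [if_neg hx]
    have hxl : x ∉ l := fun h => hx ((PySem.Set.mem_ofList l x).mpr h)
    have hmap : (PySem.Set.ofList l).map (fun k => pvPairs (((l ++ [x]).count k : Int)))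
        = (PySem.Set.ofList l).map (fun k => pvPairs ((l.count k : Int))) := by
      apply List.map_congr_left
      intro k hk
      have hkx : k ≠ x := fun he => hx (he ▸ hk)
      simp [List.count_append, Ne.symm hkx]
    have hcx : l.count x = 0 := List.count_eq_zero.mpr hxl
    simp only [List.map_append, List.map_cons, List.map_nil, List.sum_append, hmap]
    simp [List.count_append, hcx, pvPairs]

-- B's loop invariant: the running dict is Counter(prefix), the running count is pvTotal(prefix)
theorem pvB_inv (l : List Int) :
    l.foldl
      (fun (s : PySem.Dict Int Int × Int) x =>
        let c := s.1.getD x 0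
        (s.1.insert x (c + 1), s.2 + c))
      ((PySem.Dict.empty : PySem.Dict Int Int), 0)
    = (PySem.Dict.counter l, pvTotal l) := by
  induction l using List.reverseRecOn with
  | nil => rfl
  | append_singleton t x ih =>
    rw [List.foldl_append, ih]
    simp only [List.foldl_cons, List.foldl_nil]
    rw [pvTotal_step, PySem.Dict.counter_append_singleton, ← PySem.Dict.getD_counter]
    rfl

theorem pvB_eq_total (l : List Int) : solve_alt l = pvTotal l := by
  unfold solve_alt; rw [pvB_inv]

theorem pvA_eq_total (l : List Int) (h : ¬ l.length < 2) : solve l = pvTotal l := by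
  unfold solve
  rw [if_neg h]
  rw [PySem.Dict.foldl_insert_getD_add_one_eq_counter]
  rw [PySem.List.foldl_add (g := fun p : Int × Int => PySem.Int.floordiv (p.2 * (p.2 - 1)) 2)]
  rw [PySem.Dict.items_counter]
  unfold pvTotal pvPairs
  simp only [List.map_map, zero_add]
  rfl

-- ===== VERDICT (by name: the statement is the Claim_ definition above) =====
theorem solve_spec : Claim_equal_solve := by
  intro nums _
  show solve nums = solve_alt nums
  by_cases h : nums.length < 2
  · rw [pvB_eq_total]
    unfold solve
    rw [if_pos h]
    match nums, h with
    | [], _ => rfl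
    | [x], _ => simp [pvTotal, PySem.Set.ofList, PySem.Set.add, pvPairs, PySem.Int.floordiv]
  · rw [pvA_eq_total nums h, pvB_eq_total]
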